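-- pv_equiv track=rewrite | github.com/grasshopperTrainer/coding_practice | baekjoon/accepted/15685 드래곤 커브.py | solution
-- ===== SOURCE A (Python) =====
-- def solution(N, curves):
--     def rotate_clockwise(anchor, point):
--         dx, dy = map(lambda x,y: x-y, point, anchor)
--         return anchor[0] - dy, anchor[1] + dx
--
--     rects = {}
--     # bit masking to record corners touched
--     RECT_DELTA, FULL = ((-1, -1, 1), (0, 0, 2), (0, -1, 4), (-1, 0, 8)), 15
--     def update_rect(point):
--         for dx, dy, mask in RECT_DELTA:
--             rx, ry = dx+point[0], dy+point[1]
--             if 0 <= rx < 100 and 0 <= ry < 100: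
--                 rects[(rx, ry)] = rects.get((rx, ry), 0) | mask
--
--
--     HEADING_DELTA = ((1, 0), (0, -1), (-1, 0), (0, 1))
--     for ox, oy, heading, gen in curves:
--         dx, dy = HEADING_DELTA[heading]
--         points = [(ox, oy), (ox+dx, oy+dy)]
--         for p in points:
--             update_rect(p)
--
--         for _ in range(gen):
--             anchor = points[-1]
--             for idx in range(len(points)-2, -1, -1):
--                 new_point = rotate_clockwise(anchor, points[idx])
--                 update_rect(new_point)
--                 points.append(new_point)
--
--     return sum(map(lambda x: x == FULL, rects.values()))
-- ===== SOURCE B (Python) =====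
-- def solution(N, curves):
--     HEADING_DELTA = ((1, 0), (0, -1), (-1, 0), (0, 1))
--     RECT_DELTA, FULL = ((-1, -1, 1), (0, 0, 2), (0, -1, 4), (-1, 0, 8)), 15
--     rects = {}
--
--     def update_rect(x, y):
--         for dx, dy, mask in RECT_DELTA:
--             rx, ry = dx + x, dy + y
--             if 0 <= rx < 100 and 0 <= ry < 100:
--                 rects[(rx, ry)] = rects.get((rx, ry), 0) | mask
--
--     for ox, oy, heading, gen in curves:
--         # direction sequence of the dragon curve instead of a rotated point list
--         dirs = [heading]
--         for _ in range(gen):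
--             dirs = dirs + [(h + 1) % 4 for h in reversed(dirs)]
--         x, y = ox, oy
--         update_rect(x, y)
--         for h in dirs:
--             dx, dy = HEADING_DELTA[h]
--             x, y = x + dx, y + dy
--             update_rect(x, y)
--
--     return sum(v == FULL for v in rects.values())
-- ===== Notes on version B (the rewrite author's own statement) =====
-- stated objective: alternative
-- what changed: B generates each dragon curve as a direction sequence (dirs doubled per generation with (h+1)%4 on the reversed half) and marks corners in one walk from the origin, instead of A's repeated geometric rotation of the growing point list around its last point.
import Mathlib
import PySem

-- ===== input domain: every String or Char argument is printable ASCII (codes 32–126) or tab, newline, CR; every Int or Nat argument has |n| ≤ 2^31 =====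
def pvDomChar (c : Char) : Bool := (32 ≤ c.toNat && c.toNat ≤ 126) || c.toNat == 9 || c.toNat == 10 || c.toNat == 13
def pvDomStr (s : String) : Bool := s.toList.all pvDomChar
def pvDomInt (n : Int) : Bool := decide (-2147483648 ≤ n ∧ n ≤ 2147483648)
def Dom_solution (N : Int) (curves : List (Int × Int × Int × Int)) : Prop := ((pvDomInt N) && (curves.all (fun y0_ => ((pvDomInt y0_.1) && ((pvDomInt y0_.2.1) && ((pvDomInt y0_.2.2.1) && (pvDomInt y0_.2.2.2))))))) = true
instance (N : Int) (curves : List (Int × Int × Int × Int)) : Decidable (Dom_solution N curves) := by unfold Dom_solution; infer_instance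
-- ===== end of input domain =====

-- B replaces A's repeated rotation of the growing point list by a direction sequence
-- (doubled per generation) walked once from the origin; same marked corners, same count.

-- constants shared by both Pythons (module-level tables in spirit)
def pvHeadingDelta : List (Int × Int) := [(1, 0), (0, -1), (-1, 0), (0, 1)]
def pvRectDelta : List (Int × Int × Int) := [(-1, -1, 1), (0, 0, 2), (0, -1, 4), (-1, 0, 8)]
-- HEADING_DELTA[h]; total form is exact whenever -4 ≤ h < 4 (Pre_ guarantees it for headings)
def pvDelta (h : Int) : Int × Int := PySem.List.pyGetD pvHeadingDelta h (1, 0)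

-- ===== PORT A =====
def pvRotCW (anchor point : Int × Int) : Int × Int :=
  let dx := point.1 - anchor.1
  let dy := point.2 - anchor.2
  (anchor.1 - dy, anchor.2 + dx)

def pvUpdateRect (r : PySem.Dict (Int × Int) Int) (p : Int × Int) : PySem.Dict (Int × Int) Int :=
  pvRectDelta.foldl (fun r t =>
    let rx := t.1 + p.1
    let ry := t.2.1 + p.2
    if 0 ≤ rx ∧ rx < 100 ∧ 0 ≤ ry ∧ ry < 100 then
      r.insert (rx, ry) (PySem.Int.bor (r.getD (rx, ry) 0) t.2.2)
    else r) r

-- one step of the inner `for idx in range(len(points)-2, -1, -1)` loop; the index is always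
-- in range on reachable states, so the total pyGetD is exact
def pvAInner (anchor : Int × Int) (st : PySem.Dict (Int × Int) Int × List (Int × Int)) (idx : Int) :
    PySem.Dict (Int × Int) Int × List (Int × Int) :=
  let np := pvRotCW anchor (PySem.List.pyGetD st.2 idx (0, 0))
  (pvUpdateRect st.1 np, st.2 ++ [np])

def pvAGen (st : PySem.Dict (Int × Int) Int × List (Int × Int)) :
    PySem.Dict (Int × Int) Int × List (Int × Int) :=
  -- anchor = points[-1] (points is never empty), fixed before the countdown loop runs
  (PySem.List.pyRange ((st.2.length : Int) - 2) (-1) (-1)).foldl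
    (pvAInner (PySem.List.pyGetD st.2 (-1) (0, 0))) st

def pvACurve (r : PySem.Dict (Int × Int) Int) (c : Int × Int × Int × Int) :
    PySem.Dict (Int × Int) Int :=
  let d := pvDelta c.2.2.1   -- HEADING_DELTA[heading]: Python raises unless -4 ≤ heading < 4 (Pre_)
  let points : List (Int × Int) := [(c.1, c.2.1), (c.1 + d.1, c.2.1 + d.2)]
  let r := points.foldl pvUpdateRect r
  ((List.range c.2.2.2.toNat).foldl (fun st _ => pvAGen st) (r, points)).1

def solution (N : Int) (curves : List (Int × Int × Int × Int)) : Int :=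
  ((curves.foldl pvACurve PySem.Dict.empty).values.map
    (fun v => if v = 15 then (1 : Int) else 0)).sum

-- ===== PORT B =====
def pvUpdateRectB (r : PySem.Dict (Int × Int) Int) (x y : Int) : PySem.Dict (Int × Int) Int :=
  pvRectDelta.foldl (fun r t =>
    let rx := t.1 + x
    let ry := t.2.1 + y
    if 0 ≤ rx ∧ rx < 100 ∧ 0 ≤ ry ∧ ry < 100 then
      r.insert (rx, ry) (PySem.Int.bor (r.getD (rx, ry) 0) t.2.2)
    else r) r

def pvBStep (st : PySem.Dict (Int × Int) Int × Int × Int) (h : Int) :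
    PySem.Dict (Int × Int) Int × Int × Int :=
  let d := pvDelta h   -- HEADING_DELTA[h]: Python raises unless -4 ≤ h < 4 (Pre_)
  let x := st.2.1 + d.1
  let y := st.2.2 + d.2
  (pvUpdateRectB st.1 x y, x, y)

def pvBCurve (r : PySem.Dict (Int × Int) Int) (c : Int × Int × Int × Int) :
    PySem.Dict (Int × Int) Int :=
  let dirs := (List.range c.2.2.2.toNat).foldl
    (fun ds _ => ds ++ ds.reverse.map (fun h => PySem.Int.mod (h + 1) 4)) [c.2.2.1]
  let r := pvUpdateRectB r c.1 c.2.1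
  (dirs.foldl pvBStep (r, c.1, c.2.1)).1

def solution_alt (N : Int) (curves : List (Int × Int × Int × Int)) : Int :=
  ((curves.foldl pvBCurve PySem.Dict.empty).values.map
    (fun v => if v = 15 then (1 : Int) else 0)).sum

-- ===== PRECONDITION & SPEC =====
-- A (and B) raise IndexError on HEADING_DELTA[heading] unless -4 ≤ heading < 4; Pre_ excludes exactly those.
def Pre_solution (N : Int) (curves : List (Int × Int × Int × Int)) : Prop :=
  ∀ c ∈ curves, -4 ≤ c.2.2.1 ∧ c.2.2.1 < 4
instance (N : Int) (curves : List (Int × Int × Int × Int)) : Decidable (Pre_solution N curves) := by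
  unfold Pre_solution; infer_instance

def pvWitness_solution : Int × (List (Int × Int × Int × Int)) := (1, [(0, 0, 0, 1)])

def Spec_solution (N : Int) (curves : List (Int × Int × Int × Int)) (out : Int) : Prop :=
  out = solution_alt N curves
instance (N : Int) (curves : List (Int × Int × Int × Int)) (out : Int) :
    Decidable (Spec_solution N curves out) := by unfold Spec_solution; infer_instance

-- ===== CLAIM (what is proved, stated in full; the proofs are below) =====
def Claim_equal_solution : Prop := ∀ (N : Int) (curves : List (Int × Int × Int × Int)),
  Dom_solution N curves → Pre_solution N curves → Spec_solution N curves (solution N curves)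

-- ===== LEMMAS AND PROOFS =====

-- proof-side model of the walk
def pvStep (p : Int × Int) (h : Int) : Int × Int := (p.1 + (pvDelta h).1, p.2 + (pvDelta h).2)
def pvRotd (h : Int) : Int := PySem.Int.mod (h + 1) 4

def pvTrail (p : Int × Int) : List Int → List (Int × Int)
  | [] => []
  | h :: t => pvStep p h :: pvTrail (pvStep p h) t

def pvWalk (p : Int × Int) (ds : List Int) : List (Int × Int) := p :: pvTrail p ds

def pvEnd (p : Int × Int) : List Int → Int × Int
  | [] => p
  | h :: t => pvEnd (pvStep p h) t

theorem pvTrail_append (p : Int × Int) (ds es : List Int) :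
    pvTrail p (ds ++ es) = pvTrail p ds ++ pvTrail (pvEnd p ds) es := by
  induction ds generalizing p with
  | nil => simp [pvTrail, pvEnd]
  | cons h t ih => simp [pvTrail, pvEnd, ih]

theorem pvWalk_append (p : Int × Int) (ds es : List Int) :
    pvWalk p (ds ++ es) = pvWalk p ds ++ pvTrail (pvEnd p ds) es := by
  simp [pvWalk, pvTrail_append]

theorem pvWalk_length (p : Int × Int) (ds : List Int) :
    (pvWalk p ds).length = ds.length + 1 := by
  suffices h : ∀ q, (pvTrail q ds).length = ds.length by simp [pvWalk, h]
  induction ds with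
  | nil => intro q; simp [pvTrail]
  | cons h t ih => intro q; simp [pvTrail, ih]

theorem pvWalk_getLast? (ds : List Int) : ∀ (p : Int × Int),
    (pvWalk p ds).getLast? = some (pvEnd p ds) := by
  induction ds with
  | nil => intro p; simp [pvWalk, pvTrail, pvEnd]
  | cons h t ih =>
      intro p
      have h1 : pvWalk p (h :: t) = p :: pvWalk (pvStep p h) t := by simp [pvWalk, pvTrail]
      rw [h1, List.getLast?_cons, ih (pvStep p h)]
      simp [pvEnd]

-- the rotation about any anchor sends the step of direction h backwards to the step of (h+1)%4
theorem pv_rot_step (h : Int) (hb : -4 ≤ h ∧ h < 4) (q p : Int × Int) :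
    pvRotCW q p = pvStep (pvRotCW q (pvStep p h)) (pvRotd h) := by
  obtain ⟨h1, h2⟩ := hb
  interval_cases h <;>
    simp [pvRotCW, pvStep, pvRotd, pvDelta, pvHeadingDelta, PySem.List.pyGetD,
      PySem.List.pyGet?, PySem.List.pyIdx?, PySem.Int.mod, Prod.ext_iff] <;> omega

theorem pvRotd_bounds (h : Int) : -4 ≤ pvRotd h ∧ pvRotd h < 4 := by
  unfold pvRotd
  have h1 := PySem.Int.mod_nonneg (h + 1) (b := 4) (by norm_num)
  have h2 := PySem.Int.mod_lt (h + 1) (b := 4) (by norm_num)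
  omega

-- the rotated reversed walk is the walk of the rotated reversed directions
theorem pv_rot_reverse_walk (ds : List Int) (p : Int × Int)
    (hb : ∀ h ∈ ds, -4 ≤ h ∧ h < 4) :
    ((pvWalk p ds).reverse).map (pvRotCW (pvEnd p ds))
      = pvWalk (pvEnd p ds) (ds.reverse.map pvRotd) := by
  induction ds generalizing p with
  | nil => simp [pvWalk, pvTrail, pvEnd, pvRotCW]
  | cons h t ih =>
      have hq : pvEnd p (h :: t) = pvEnd (pvStep p h) t := rfl
      have hw : pvWalk p (h :: t) = p :: pvWalk (pvStep p h) t := by simp [pvWalk, pvTrail]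
      have hb' : ∀ g ∈ t, -4 ≤ g ∧ g < 4 := fun g hg => hb g (List.mem_cons_of_mem h hg)
      have ih' := ih (pvStep p h) hb'
      -- last point of the rotated reversed walk
      have hend : pvEnd (pvEnd (pvStep p h) t) (t.reverse.map pvRotd)
          = pvRotCW (pvEnd (pvStep p h) t) (pvStep p h) := by
        have h1 := congrArg List.getLast? ih'
        rw [List.getLast?_map, List.getLast?_reverse] at h1
        rw [pvWalk_getLast?] at h1
        simp [pvWalk] at h1
        rw [List.map_reverse]
        exact h1.symm
      rw [hq, hw]
      simp only [List.reverse_cons, List.map_append, List.map_reverse, List.map_cons,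
        List.map_nil, ih']
      rw [pvWalk_append]
      simp only [pvTrail]
      rw [List.map_reverse] at ih'
      congr 1
      rw [← List.map_reverse, hend,
        ← pv_rot_step h (hb h List.mem_cons_self) (pvEnd (pvStep p h) t) p]

theorem pv_rot_dropLast (ds : List Int) (p : Int × Int)
    (hb : ∀ h ∈ ds, -4 ≤ h ∧ h < 4) :
    ((pvWalk p ds).dropLast.reverse).map (pvRotCW (pvEnd p ds))
      = pvTrail (pvEnd p ds) (ds.reverse.map pvRotd) := by
  have hne : pvWalk p ds ≠ [] := by simp [pvWalk]
  have hlast : (pvWalk p ds).getLast hne = pvEnd p ds := by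
    have h2 := pvWalk_getLast? ds p
    rw [List.getLast?_eq_getLast hne] at h2
    exact Option.some.inj h2
  have h1 := pv_rot_reverse_walk ds p hb
  rw [← List.dropLast_append_getLast hne, List.reverse_append] at h1
  simp only [List.reverse_cons, List.reverse_nil, List.nil_append, List.singleton_append,
    List.map_cons] at h1
  have hqq : pvRotCW (pvEnd p ds) (pvEnd p ds) = pvEnd p ds := by simp [pvRotCW]
  rw [hlast, hqq] at h1
  have h2 : pvWalk (pvEnd p ds) (ds.reverse.map pvRotd)
      = pvEnd p ds :: pvTrail (pvEnd p ds) (ds.reverse.map pvRotd) := rfl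
  rw [h2] at h1
  injection h1

-- the inner countdown loop appends the rotated prefix in reverse order
theorem pvAInner_loop (P : List (Int × Int)) (anchor : Int × Int) (m : Nat) (hm : m < P.length) :
    ∀ (suffix : List (Int × Int)) (R : PySem.Dict (Int × Int) Int),
    (PySem.List.pyRange (m : Int) (-1) (-1)).foldl (pvAInner anchor) (R, P ++ suffix)
      = (((P.take (m + 1)).reverse.map (pvRotCW anchor)).foldl pvUpdateRect R,
         P ++ suffix ++ (P.take (m + 1)).reverse.map (pvRotCW anchor)) := by
  induction m with
  | zero =>
      intro suffix R
      have h0 : PySem.List.pyRange ((0 : Nat) : Int) (-1) (-1) = [0] := by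
        rw [PySem.List.pyRange_neg_one_cons (by norm_num), PySem.List.pyRange_neg_one_eq_nil (by norm_num)]
        norm_num
      rw [h0]
      simp only [List.foldl_cons, List.foldl_nil, pvAInner]
      have hg : PySem.List.pyGetD (P ++ suffix) 0 ((0 : Int), (0 : Int)) = P[0] := by
        have h3 := PySem.List.pyGetD_natCast (P ++ suffix) 0 ((0 : Int), (0 : Int))
        simp only [Nat.cast_zero] at h3
        rw [h3, List.getD_eq_getElem?_getD, List.getElem?_append_left hm,
          List.getElem?_eq_getElem hm]
        rfl
      have ht : P.take 1 = [P[0]] := by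
        rw [List.take_succ]
        simp [List.getElem?_eq_getElem hm]
      rw [hg, ht]
      simp [List.append_assoc]
  | succ m ih =>
      intro suffix R
      have hm' : m < P.length := Nat.lt_of_succ_lt hm
      have hcast : ((m + 1 : Nat) : Int) - 1 = ((m : Nat) : Int) := by push_cast; ring
      rw [PySem.List.pyRange_neg_one_cons (by push_cast; omega : (-1 : Int) < ((m + 1 : Nat) : Int)), hcast]
      simp only [List.foldl_cons, pvAInner]
      have hg : PySem.List.pyGetD (P ++ suffix) ((m + 1 : Nat) : Int) ((0 : Int), (0 : Int)) = P[m + 1] := by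
        rw [PySem.List.pyGetD_natCast, List.getD_eq_getElem?_getD, List.getElem?_append_left hm,
          List.getElem?_eq_getElem hm]
        rfl
      rw [hg]
      have hassoc : P ++ suffix ++ [pvRotCW anchor P[m + 1]]
          = P ++ (suffix ++ [pvRotCW anchor P[m + 1]]) := by simp [List.append_assoc]
      rw [hassoc, ih hm' (suffix ++ [pvRotCW anchor P[m + 1]]) (pvUpdateRect R (pvRotCW anchor P[m + 1]))]
      have htake : P.take (m + 1 + 1) = P.take (m + 1) ++ [P[m + 1]] := by
        rw [List.take_succ]
        simp [List.getElem?_eq_getElem hm]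
      rw [htake]
      simp only [List.reverse_append, List.reverse_singleton, List.map_append, List.map_cons,
        List.map_nil, List.singleton_append, List.foldl_cons, List.append_assoc]

theorem pvAGen_walk (p : Int × Int) (ds : List Int) (hne : ds ≠ [])
    (hb : ∀ h ∈ ds, -4 ≤ h ∧ h < 4) (R : PySem.Dict (Int × Int) Int) :
    pvAGen (R, pvWalk p ds)
      = ((pvTrail (pvEnd p ds) (ds.reverse.map pvRotd)).foldl pvUpdateRect R,
         pvWalk p (ds ++ ds.reverse.map pvRotd)) := by
  obtain ⟨k, hk⟩ : ∃ k, ds.length = k + 1 := by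
    cases ds with
    | nil => exact absurd rfl hne
    | cons a t => exact ⟨t.length, by simp⟩
  have hlen : (pvWalk p ds).length = k + 2 := by rw [pvWalk_length, hk]
  have hne' : pvWalk p ds ≠ [] := by simp [pvWalk]
  have hanchor : PySem.List.pyGetD (pvWalk p ds) (-1) ((0 : Int), (0 : Int)) = pvEnd p ds := by
    rw [PySem.List.pyGetD_neg_one _ _ hne']
    have h2 := pvWalk_getLast? ds p
    rw [List.getLast?_eq_getLast hne'] at h2
    exact Option.some.inj h2
  unfold pvAGen
  simp only [hanchor]
  rw [show ((pvWalk p ds).length : Int) - 2 = ((k : Nat) : Int) by rw [hlen]; push_cast; ring]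
  have hloop := pvAInner_loop (pvWalk p ds) (pvEnd p ds) k (by rw [hlen]; omega) [] R
  simp only [List.append_nil] at hloop
  rw [hloop]
  have hdl : (pvWalk p ds).take (k + 1) = (pvWalk p ds).dropLast := by
    rw [List.dropLast_eq_take, hlen]
    norm_num
  rw [hdl, pv_rot_dropLast ds p hb, pvWalk_append]

-- B's direction list after k generations
def pvDirs (k : Nat) (ds : List Int) : List Int :=
  (List.range k).foldl (fun ds _ => ds ++ ds.reverse.map (fun h => PySem.Int.mod (h + 1) 4)) ds

theorem pvDirs_ne_nil (k : Nat) (ds : List Int) (h : ds ≠ []) : pvDirs k ds ≠ [] := by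
  induction k with
  | zero => simpa [pvDirs]
  | succ n ih => simp [pvDirs, List.range_succ, List.foldl_append] at *; simp [ih]

theorem pvDirs_bounds (k : Nat) (ds : List Int) (hb : ∀ h ∈ ds, -4 ≤ h ∧ h < 4) :
    ∀ h ∈ pvDirs k ds, -4 ≤ h ∧ h < 4 := by
  induction k with
  | zero => simpa [pvDirs]
  | succ n ih =>
      simp only [pvDirs, List.range_succ, List.foldl_append, List.foldl_cons, List.foldl_nil]
      intro h hmem
      rcases List.mem_append.1 hmem with h1 | h1
      · exact ih h h1
      · rcases List.mem_map.1 h1 with ⟨g, _, rfl⟩; exact pvRotd_bounds g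

theorem pv_gen_loop (k : Nat) (p : Int × Int) (ds : List Int) (hne : ds ≠ [])
    (hb : ∀ h ∈ ds, -4 ≤ h ∧ h < 4) (R : PySem.Dict (Int × Int) Int) :
    (List.range k).foldl (fun st _ => pvAGen st) ((pvWalk p ds).foldl pvUpdateRect R, pvWalk p ds)
      = ((pvWalk p (pvDirs k ds)).foldl pvUpdateRect R, pvWalk p (pvDirs k ds)) := by
  induction k with
  | zero => simp [pvDirs]
  | succ n ih =>
      have hD : pvDirs (n + 1) ds = pvDirs n ds ++ (pvDirs n ds).reverse.map pvRotd := by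
        unfold pvDirs
        rw [List.range_succ, List.foldl_append]
        rfl
      rw [List.range_succ, List.foldl_append]
      simp only [List.foldl_cons, List.foldl_nil]
      rw [ih, pvAGen_walk p (pvDirs n ds) (pvDirs_ne_nil n ds hne) (pvDirs_bounds n ds hb) _, hD,
        pvWalk_append, List.foldl_append]

theorem pvUpdateRectB_eq (r : PySem.Dict (Int × Int) Int) (x y : Int) :
    pvUpdateRectB r x y = pvUpdateRect r (x, y) := rfl

theorem pvBStep_loop (ds : List Int) :
    ∀ (R : PySem.Dict (Int × Int) Int) (x y : Int),
    ds.foldl pvBStep (R, x, y)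
      = ((pvTrail (x, y) ds).foldl pvUpdateRect R, (pvEnd (x, y) ds).1, (pvEnd (x, y) ds).2) := by
  induction ds with
  | nil => intro R x y; simp [pvTrail, pvEnd]
  | cons h t ih =>
      intro R x y
      simp only [List.foldl_cons, pvTrail, pvEnd]
      rw [ih]
      rfl

theorem pvCurve_eq (c : Int × Int × Int × Int) (hb : -4 ≤ c.2.2.1 ∧ c.2.2.1 < 4)
    (r : PySem.Dict (Int × Int) Int) : pvACurve r c = pvBCurve r c := by
  obtain ⟨ox, oy, h, g⟩ := c
  simp only at hb
  unfold pvACurve pvBCurve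
  simp only
  have hwalk1 : [((ox, oy) : Int × Int), (ox + (pvDelta h).1, oy + (pvDelta h).2)]
      = pvWalk (ox, oy) [h] := rfl
  rw [hwalk1, pv_gen_loop g.toNat (ox, oy) [h] (by simp) (by simpa using hb) r]
  have hdirs : (List.range g.toNat).foldl
      (fun ds _ => ds ++ ds.reverse.map (fun h => PySem.Int.mod (h + 1) 4)) [h]
      = pvDirs g.toNat [h] := rfl
  rw [hdirs, pvBStep_loop, pvUpdateRectB_eq]
  rfl

-- ===== VERDICT (by name: the statement is the Claim_ definition above) =====
theorem solution_spec : Claim_equal_solution := by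
  intro N curves _ hpre
  unfold Spec_solution solution solution_alt
  have : curves.foldl pvACurve PySem.Dict.empty = curves.foldl pvBCurve PySem.Dict.empty :=
    PySem.List.foldl_congr_mem curves pvACurve pvBCurve PySem.Dict.empty (fun acc c hc => pvCurve_eq c (hpre c hc) acc)
  rw [this]
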